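-- pv_equiv track=rewrite | github.com/AyeliSuarez/EntornoProgramacion | Programas/Ejercicio3_Examen1.py | count_reps
-- ===== SOURCE A (Python) =====
-- def count_reps(nums):
--     cont = []
--     repetidos = 0
--     unicos = 0
--
--     for i in nums:
--         if nums.count(i) > 1 and i not in cont:
--             repetidos += nums.count(i)
--             cont.append(i)
--         elif i not in cont:
--             unicos += 1
--
--     return unicos, repetidos
-- ===== SOURCE B (Python) =====
-- def count_reps(nums):
--     # One-pass frequency map; repetidos falls out of the identity
--     # repetidos = len(nums) - unicos (every occurrence is either a
--     # unique value, counted in unicos, or part of a repeated value).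
--     freq = {}
--     for x in nums:
--         freq[x] = freq.get(x, 0) + 1
--     unicos = sum(1 for c in freq.values() if c == 1)
--     return unicos, len(nums) - unicos
-- ===== Notes on version B (the rewrite author's own statement) =====
-- stated objective: faster
-- what changed: B builds a frequency map in one pass and derives repetidos arithmetically as len(nums) - unicos, instead of A's quadratic loop that calls nums.count(i) per element and accumulates repeated counts into an auxiliary seen-list.
import Mathlib
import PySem

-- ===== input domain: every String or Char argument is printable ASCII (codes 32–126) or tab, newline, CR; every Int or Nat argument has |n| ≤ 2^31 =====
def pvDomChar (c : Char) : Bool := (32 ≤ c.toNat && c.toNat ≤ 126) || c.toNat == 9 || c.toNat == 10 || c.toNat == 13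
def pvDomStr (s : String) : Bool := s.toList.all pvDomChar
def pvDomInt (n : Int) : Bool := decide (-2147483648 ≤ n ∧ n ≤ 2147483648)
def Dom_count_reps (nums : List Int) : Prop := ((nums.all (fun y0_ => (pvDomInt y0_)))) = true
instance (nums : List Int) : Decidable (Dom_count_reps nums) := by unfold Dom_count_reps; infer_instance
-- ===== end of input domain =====

-- B replaces A's quadratic per-element nums.count scans with a one-pass frequency
-- map and derives repetidos arithmetically as len(nums) - unicos (objective: faster).

-- ===== PORT A =====
-- A: loop over nums keeping (cont, repetidos, unicos); nums.count(i) per element.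
def count_reps (nums : List Int) : Int × Int :=
  let st := nums.foldl
    (fun (s : List Int × Int × Int) i =>
      let cont := s.1
      let repetidos := s.2.1
      let unicos := s.2.2
      if PySem.List.count nums i > 1 && !(cont.contains i) then
        (cont ++ [i], repetidos + (PySem.List.count nums i : Int), unicos)
      else if !(cont.contains i) then
        (cont, repetidos, unicos + 1)
      else s)
    ([], 0, 0)
  (st.2.2, st.2.1)

-- ===== PORT B =====
-- B: freq = {}; for x in nums: freq[x] = freq.get(x,0)+1;
--    unicos = sum(1 for c in freq.values() if c == 1); return unicos, len(nums)-unicos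
def count_reps_alt (nums : List Int) : Int × Int :=
  let freq : PySem.Dict Int Int :=
    nums.foldl (fun d x => d.insert x (d.getD x 0 + 1)) PySem.Dict.empty
  let unicos : Int := (freq.values.map (fun c => if c == 1 then (1 : Int) else 0)).sum
  (unicos, (nums.length : Int) - unicos)

-- ===== PRECONDITION & SPEC =====
def Spec_count_reps (nums : List Int) (out : Int × Int) : Prop := out = count_reps_alt nums
instance (nums : List Int) (out : Int × Int) : Decidable (Spec_count_reps nums out) := by unfold Spec_count_reps; infer_instance

-- ===== CLAIM (what is proved, stated in full; the proofs are below) =====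
def Claim_equal_count_reps : Prop := ∀ (nums : List Int), Dom_count_reps nums → Spec_count_reps nums (count_reps nums)

-- ===== LEMMAS AND PROOFS =====

-- The keys that A's loop appends to `cont` while processing suffix `l`,
-- starting from seen-list `cont` (first occurrences of repeated values).
def addedKeys (nums : List Int) (cont : List Int) : List Int → List Int
  | [] => []
  | i :: t =>
    if PySem.List.count nums i > 1 && !(cont.contains i) then
      i :: addedKeys nums (cont ++ [i]) t
    else addedKeys nums cont t

-- Characterisation of A's fold: cont grows by addedKeys, repetidos by their counts,
-- unicos by the number of count-1 occurrences.
theorem foldA_char (nums : List Int) (l : List Int) (cont : List Int) (rep uni : Int)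
    (hcont : ∀ x ∈ cont, 1 < List.count x nums) (hl : ∀ i ∈ l, i ∈ nums) :
    l.foldl
      (fun (s : List Int × Int × Int) i =>
        let cont := s.1
        let repetidos := s.2.1
        let unicos := s.2.2
        if PySem.List.count nums i > 1 && !(cont.contains i) then
          (cont ++ [i], repetidos + (PySem.List.count nums i : Int), unicos)
        else if !(cont.contains i) then
          (cont, repetidos, unicos + 1)
        else s)
      (cont, rep, uni)
    = (cont ++ addedKeys nums cont l,
       rep + ((addedKeys nums cont l).map (fun k => (List.count k nums : Int))).sum,
       uni + (l.countP (fun i => List.count i nums == 1) : Int)) := by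
  induction l generalizing cont rep uni with
  | nil => simp [addedKeys]
  | cons i t ih =>
    have hinums : i ∈ nums := hl i (List.mem_cons_self)
    have hpos : 1 ≤ List.count i nums := List.count_pos_iff.mpr hinums
    have hl' : ∀ j ∈ t, j ∈ nums := fun j hj => hl j (List.mem_cons_of_mem _ hj)
    by_cases hg : (decide (PySem.List.count nums i > 1) && !(cont.contains i)) = true
    · have h1 : 1 < List.count i nums := by
        have := (Bool.and_eq_true _ _).mp hg
        simpa [PySem.List.count] using of_decide_eq_true this.1
      have hni : cont.contains i = false := by
        have := (Bool.and_eq_true _ _).mp hg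
        simpa using this.2
      have hq : (List.count i nums == 1) = false := by
        simp only [beq_eq_false_iff_ne, ne_eq]; omega
      have hcont' : ∀ x ∈ cont ++ [i], 1 < List.count x nums := by
        intro x hx
        rcases List.mem_append.mp hx with h | h
        · exact hcont x h
        · rwa [List.mem_singleton.mp h]
      simp only [List.foldl_cons, addedKeys, hg, if_true, List.countP_cons, hq,
        List.map_cons, List.sum_cons]
      rw [ih (cont ++ [i]) _ _ hcont' hl']
      refine Prod.ext (by simp [List.append_assoc]) (Prod.ext ?_ ?_)
      · show rep + ↑(PySem.List.count nums i) + _ = rep + (↑(List.count i nums) + _)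
        simp [PySem.List.count]; ring
      · simp
    · have hg' : (decide (PySem.List.count nums i > 1) && !(cont.contains i)) = false :=
        Bool.not_eq_true _ ▸ (Bool.eq_false_iff.mpr (fun h => hg h))
      by_cases hin : cont.contains i = true
      · have h2 : 1 < List.count i nums := hcont i (by simpa using hin)
        have hq : (List.count i nums == 1) = false := by
          simp only [beq_eq_false_iff_ne, ne_eq]; omega
        simp only [List.foldl_cons, addedKeys, hin, Bool.not_true, Bool.and_false,
          Bool.false_eq_true, if_false, List.countP_cons, hq, Nat.add_zero]
        exact ih cont _ _ hcont hl'
      · have hin' : cont.contains i = false := by simpa using hin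
        have hd : decide (PySem.List.count nums i > 1) = false := by
          rcases Bool.and_eq_false_iff.mp hg' with h | h
          · exact h
          · exfalso; rw [hin'] at h; simp at h
        have h1 : List.count i nums = 1 := by
          have := of_decide_eq_false hd
          simp [PySem.List.count] at this
          omega
        have hq : (List.count i nums == 1) = true := by simp [h1]
        simp only [List.foldl_cons, addedKeys, hd, Bool.false_and, Bool.false_eq_true,
          if_false, hin', Bool.not_false, if_true, List.countP_cons, hq]
        rw [ih cont _ _ hcont hl']
        refine Prod.ext rfl (Prod.ext rfl ?_)
        simp
        ring

theorem mem_addedKeys (nums : List Int) (l : List Int) (cont : List Int) (x : Int) :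
    x ∈ addedKeys nums cont l ↔ x ∈ l ∧ 1 < List.count x nums ∧ x ∉ cont := by
  induction l generalizing cont with
  | nil => simp [addedKeys]
  | cons i t ih =>
    by_cases hc : (decide (PySem.List.count nums i > 1) && !(cont.contains i)) = true
    · simp only [addedKeys, if_pos hc, List.mem_cons, ih]
      simp only [Bool.and_eq_true, decide_eq_true_eq, Bool.not_eq_true'] at hc
      constructor
      · rintro (rfl | ⟨ht, hcnt, hnc⟩)
        · exact ⟨Or.inl rfl, by simpa [PySem.List.count] using hc.1, by simpa using hc.2⟩
        · refine ⟨Or.inr ht, hcnt, ?_⟩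
          intro hx; exact hnc (List.mem_append_left _ hx)
      · rintro ⟨hi | ht, hcnt, hnc⟩
        · exact Or.inl hi
        · by_cases hxi : x = i
          · exact Or.inl hxi
          · exact Or.inr ⟨ht, hcnt, by simp [hxi, hnc]⟩
    · simp only [addedKeys, if_neg hc, ih, List.mem_cons]
      simp only [Bool.and_eq_true, decide_eq_true_eq, Bool.not_eq_true', not_and] at hc
      constructor
      · rintro ⟨ht, hcnt, hnc⟩; exact ⟨Or.inr ht, hcnt, hnc⟩
      · rintro ⟨hi | ht, hcnt, hnc⟩
        · -- x = i would contradict the guard being false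
          subst hi
          by_cases h1 : PySem.List.count nums x > 1
          · have := hc h1
            exact absurd (by simpa using this) hnc
          · exact absurd (by simpa [PySem.List.count] using hcnt) h1
        · exact ⟨ht, hcnt, hnc⟩

theorem nodup_addedKeys (nums : List Int) (l : List Int) (cont : List Int)
    (hnd : cont.Nodup) : (cont ++ addedKeys nums cont l).Nodup := by
  induction l generalizing cont with
  | nil => simpa [addedKeys]
  | cons i t ih =>
    by_cases hc : (decide (PySem.List.count nums i > 1) && !(cont.contains i)) = true
    · have hni : i ∉ cont := by
        have := (Bool.and_eq_true _ _).mp hc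
        simpa using this.2
      have hstep : ((cont ++ [i]) ++ addedKeys nums (cont ++ [i]) t).Nodup :=
        ih (cont ++ [i]) (by
          simp [List.nodup_append, hnd]
          exact fun a ha h => hni (h ▸ ha))
      simp only [addedKeys]
      rw [if_pos hc]
      simpa [List.append_assoc] using hstep
    · simp only [addedKeys]
      rw [if_neg hc]
      exact ih cont hnd

-- Sums of a function over two nodup lists with the same members agree.
theorem sum_map_eq_of_nodup_mem {α : Type} [DecidableEq α] (f : α → Int)
    (l₁ l₂ : List α) (h₁ : l₁.Nodup) (h₂ : l₂.Nodup)
    (hmem : ∀ x, x ∈ l₁ ↔ x ∈ l₂) :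
    (l₁.map f).sum = (l₂.map f).sum :=
  (((List.perm_ext_iff_of_nodup h₁ h₂).mpr hmem).map f).sum_eq

-- Total count over the distinct values is the length.
theorem sum_count_ofList (nums : List Int) :
    ((PySem.Set.ofList nums).map (fun k => (List.count k nums : Int))).sum
      = (nums.length : Int) := by
  have hperm : (PySem.Set.ofList nums : List Int).Perm nums.dedup := by
    refine (List.perm_ext_iff_of_nodup (PySem.Set.nodup_ofList nums) nums.nodup_dedup).mpr ?_
    intro a; rw [PySem.Set.mem_ofList, List.mem_dedup]
  rw [(hperm.map _).sum_eq, ← List.sum_map_count_dedup_eq_length nums,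
    Nat.cast_list_sum, List.map_map]
  rfl

-- A's unicos (over occurrences) equals B's unicos (over distinct values):
-- a value with count 1 occurs exactly once.
theorem countP_count_one_eq (nums : List Int) :
    nums.countP (fun i => List.count i nums == 1)
      = (PySem.Set.ofList nums : List Int).countP (fun i => List.count i nums == 1) := by
  rw [List.countP_eq_length_filter, List.countP_eq_length_filter]
  have h₁ : (nums.filter (fun i => List.count i nums == 1)).Nodup := by
    rw [List.nodup_iff_count_le_one]
    intro a
    by_cases h : List.count a nums = 1
    · have hle := (List.filter_sublist (p := fun i => List.count i nums == 1)
        (l := nums)).count_le a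
      omega
    · have h0 : List.count a (nums.filter (fun i => List.count i nums == 1)) = 0 := by
        rw [List.count_eq_zero]
        intro hmem
        exact h (by simpa using (List.mem_filter.mp hmem).2)
      omega
  have h₂ : ((PySem.Set.ofList nums : List Int).filter
      (fun i => List.count i nums == 1)).Nodup :=
    (PySem.Set.nodup_ofList nums).filter _
  have hmem : ∀ x, x ∈ nums.filter (fun i => List.count i nums == 1) ↔
      x ∈ (PySem.Set.ofList nums : List Int).filter (fun i => List.count i nums == 1) := by
    intro x
    simp only [List.mem_filter, PySem.Set.mem_ofList]
  exact ((List.perm_ext_iff_of_nodup h₁ h₂).mpr hmem).length_eq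

-- B's value list is the counts of the distinct values in first-appearance order.
theorem values_counter (nums : List Int) :
    (PySem.Dict.counter nums).values
      = (PySem.Set.ofList nums : List Int).map (fun k => (List.count k nums : Int)) := by
  have hnd : (PySem.Dict.counter nums).keys.Nodup := by
    rw [PySem.Dict.keys_counter]; exact PySem.Set.nodup_ofList nums
  have hitems := PySem.Dict.items_eq_map_keys (PySem.Dict.counter nums) hnd (0 : Int)
  unfold PySem.Dict.values
  rw [hitems, List.map_map, PySem.Dict.keys_counter]
  refine List.map_congr_left ?_
  intro k _
  simp [PySem.Dict.getD_counter]

theorem count_reps_eq (nums : List Int) : count_reps nums = count_reps_alt nums := by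
  have hB : count_reps_alt nums =
      (((PySem.Set.ofList nums : List Int).countP (fun i => List.count i nums == 1) : Int),
       (nums.length : Int) -
         ((PySem.Set.ofList nums : List Int).countP (fun i => List.count i nums == 1) : Int)) := by
    simp only [count_reps_alt]
    rw [PySem.Dict.foldl_insert_getD_add_one_eq_counter, values_counter, List.map_map]
    have hcomp : ((fun c => if c == 1 then (1:Int) else 0) ∘ fun k => (List.count k nums : Int))
        = fun k => if (List.count k nums == 1 : Bool) then (1:Int) else 0 := by
      funext k
      by_cases h : List.count k nums = 1 <;> simp [Function.comp, h]
    rw [hcomp, PySem.List.sum_map_ite_one_zero]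
  have hfold := foldA_char nums nums [] 0 0 (by simp) (fun i h => h)
  have hA : count_reps nums =
      ((nums.countP (fun i => List.count i nums == 1) : Int),
       ((addedKeys nums [] nums).map (fun k => (List.count k nums : Int))).sum) := by
    show ((nums.foldl _ ([], 0, 0)).2.2, (nums.foldl _ ([], 0, 0)).2.1) = _
    rw [hfold]
    simp
  have hndA : (addedKeys nums [] nums).Nodup := by
    simpa using nodup_addedKeys nums nums [] List.nodup_nil
  have hndF : ((PySem.Set.ofList nums : List Int).filter
      (fun k => decide (1 < List.count k nums))).Nodup :=
    (PySem.Set.nodup_ofList nums).filter _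
  have hmemA : ∀ x, x ∈ addedKeys nums [] nums ↔
      x ∈ (PySem.Set.ofList nums : List Int).filter (fun k => decide (1 < List.count k nums)) := by
    intro x
    rw [mem_addedKeys, List.mem_filter, PySem.Set.mem_ofList]
    simp

  have hrep : ((addedKeys nums [] nums).map (fun k => (List.count k nums : Int))).sum
      = (((PySem.Set.ofList nums : List Int).filter
          (fun k => decide (1 < List.count k nums))).map
            (fun k => (List.count k nums : Int))).sum :=
    sum_map_eq_of_nodup_mem _ _ _ hndA hndF hmemA
  -- split the total count over distinct values into repeated and unique parts
  have hperm := List.filter_append_perm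
    (fun k => decide (1 < List.count k nums)) (PySem.Set.ofList nums : List Int)
  have hsum := (hperm.map (fun k => (List.count k nums : Int))).sum_eq
  rw [List.map_append, List.sum_append, sum_count_ofList nums] at hsum
  have hone : (((PySem.Set.ofList nums : List Int).filter
        (fun k => !decide (1 < List.count k nums))).map
          (fun k => (List.count k nums : Int))).sum
      = ((PySem.Set.ofList nums : List Int).countP (fun i => List.count i nums == 1) : Int) := by
    have hpos : ∀ k ∈ (PySem.Set.ofList nums : List Int), 1 ≤ List.count k nums := fun k hk =>
      List.count_pos_iff.mpr ((PySem.Set.mem_ofList nums k).mp hk)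
    have heqf : (PySem.Set.ofList nums : List Int).filter (fun k => !decide (1 < List.count k nums))
        = (PySem.Set.ofList nums : List Int).filter (fun i => List.count i nums == 1) := by
      apply List.filter_congr
      intro k hk
      have h1 := hpos k hk
      by_cases h : List.count k nums = 1
      · simp [h]
      · have h2 : 1 < List.count k nums := by omega
        have hb : (List.count k nums == 1) = false := by simp [h]
        have hd : decide (1 < List.count k nums) = true := by simp [h2]
        rw [hb, hd]
        rfl
    rw [heqf, List.countP_eq_length_filter]
    have hconst : ∀ k ∈ (PySem.Set.ofList nums : List Int).filter
        (fun i => List.count i nums == 1), (List.count k nums : Int) = 1 := by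
      intro k hk
      have := (List.mem_filter.mp hk).2
      simp at this
      rw [this]
      rfl
    rw [List.map_congr_left hconst]
    simp
  rw [hA, hB, hrep, countP_count_one_eq nums]
  rw [hone] at hsum
  exact Prod.ext rfl (by omega)

-- ===== VERDICT (by name: the statement is the Claim_ definition above) =====
theorem count_reps_spec : Claim_equal_count_reps := by
  intro nums _
  unfold Spec_count_reps
  exact count_reps_eq nums
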